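-- pv_equiv track=rewrite | github.com/TabL0ck/Lena | modules/Lena_small_def/Lena_small_def.py | delete_text_before_command
-- ===== SOURCE A (Python) =====
-- def delete_text_before_command(cmd,dictionary):
-- 	for x in dictionary:
-- 		temp_str = ''
-- 		temp_str2 = ''
-- 		for y in cmd:
-- 			if y != ' ' :
-- 				temp_str2 = temp_str2 + y
-- 				temp_str = temp_str + y
-- 			else:
-- 				temp_str2 = temp_str2 + y
-- 				if x == temp_str:
-- 					cmd = cmd.replace(temp_str2,"").strip()
-- 					return cmd
-- 				else:
-- 					temp_str = ''
-- ===== SOURCE B (Python) =====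
-- def delete_text_before_command(cmd, dictionary):
--     # one pass over cmd with an argmin accumulator instead of one cmd scan per dictionary word
--     idx = {}
--     i = 0
--     for w in dictionary:
--         if w not in idx:
--             idx[w] = i
--         i += 1
--     run = ''
--     prefix = ''
--     best = None  # (lowest dictionary index seen, prefix up to and incl. that space)
--     for y in cmd:
--         prefix += y
--         if y == ' ':
--             j = idx.get(run)
--             if j is not None and (best is None or j < best[0]):
--                 best = (j, prefix)
--             run = ''
--         else:
--             run += y
--     if best is None:
--         return None
--     return cmd.replace(best[1], '').strip()
-- ===== Notes on version B (the rewrite author's own statement) =====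
-- stated objective: faster
-- what changed: Instead of rescanning cmd once per dictionary word with early return, B builds a word-to-first-index map once and makes a single pass over cmd, keeping an argmin (lowest dictionary index, its prefix) over the space-terminated runs.
import Mathlib
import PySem

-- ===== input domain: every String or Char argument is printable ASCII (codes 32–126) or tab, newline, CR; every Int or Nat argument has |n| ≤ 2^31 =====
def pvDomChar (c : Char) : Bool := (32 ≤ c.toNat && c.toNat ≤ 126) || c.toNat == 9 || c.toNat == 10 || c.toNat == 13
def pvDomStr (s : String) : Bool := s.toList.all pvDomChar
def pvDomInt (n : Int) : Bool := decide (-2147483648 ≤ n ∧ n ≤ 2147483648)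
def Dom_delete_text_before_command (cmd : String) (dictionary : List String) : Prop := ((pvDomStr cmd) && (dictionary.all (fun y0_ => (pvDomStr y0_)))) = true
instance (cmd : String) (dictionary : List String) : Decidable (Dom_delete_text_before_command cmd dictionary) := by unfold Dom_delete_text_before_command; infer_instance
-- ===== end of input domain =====

-- B replaces A's per-dictionary-word rescans of cmd by one word→first-index map and a single
-- argmin pass over cmd (objective: faster, one cmd scan instead of one per dictionary word).

-- ===== PORT A =====
-- inner 'for y in cmd' loop of A for one dictionary word x; ts = temp_str, ts2 = temp_str2
def aInner (cmd : String) (x : String) : List Char → List Char → List Char → Option String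
  | [], _, _ => none
  | y :: ys, ts, ts2 =>
    if y ≠ ' ' then aInner cmd x ys (ts ++ [y]) (ts2 ++ [y])
    else
      if x.toList = ts then
        some (PySem.Str.strip (PySem.Str.replace cmd (String.ofList (ts2 ++ [y])) ""))
      else
        aInner cmd x ys [] (ts2 ++ [y])

-- outer 'for x in dictionary' loop of A (falls through to the next word when no return happened)
def aOuter (cmd : String) : List String → Option String
  | [] => none
  | x :: rest =>
    match aInner cmd x cmd.toList [] [] with
    | some r => some r
    | none => aOuter cmd rest

def delete_text_before_command (cmd : String) (dictionary : List String) : Option String :=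
  aOuter cmd dictionary

-- ===== PORT B =====
-- 'for w in dictionary: if w not in idx: idx[w] = i; i += 1'
def bIndexLoop : List String → Int → PySem.Dict String Int → PySem.Dict String Int
  | [], _, d => d
  | w :: ws, i, d => bIndexLoop ws (i + 1) (if d.contains w then d else d.insert w i)

-- 'for y in cmd' loop of B: state (run, prefix, best)
def bLoop (idx : PySem.Dict String Int) :
    List Char → List Char → List Char → Option (Int × List Char) → Option (Int × List Char)
  | [], _, _, best => best
  | y :: ys, run, pfx, best =>
    let pfx' := pfx ++ [y]
    if y = ' ' then
      let best' :=
        match idx.get? (String.ofList run) with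
        | none => best
        | some j =>
          match best with
          | none => some (j, pfx')
          | some (b, p) => if j < b then some (j, pfx') else some (b, p)
      bLoop idx ys [] pfx' best'
    else
      bLoop idx ys (run ++ [y]) pfx' best

def delete_text_before_command_alt (cmd : String) (dictionary : List String) : Option String :=
  match bLoop (bIndexLoop dictionary 0 PySem.Dict.empty) cmd.toList [] [] none with
  | none => none
  | some (_, p) => some (PySem.Str.strip (PySem.Str.replace cmd (String.ofList p) ""))

-- ===== PRECONDITION & SPEC =====
def Spec_delete_text_before_command (cmd : String) (dictionary : List String) (out : Option String) : Prop := out = delete_text_before_command_alt cmd dictionary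
instance (cmd : String) (dictionary : List String) (out : Option String) : Decidable (Spec_delete_text_before_command cmd dictionary out) := by unfold Spec_delete_text_before_command; infer_instance

-- ===== CLAIM (what is proved, stated in full; the proofs are below) =====
def Claim_equal_delete_text_before_command : Prop := ∀ (cmd : String) (dictionary : List String), Dom_delete_text_before_command cmd dictionary → Spec_delete_text_before_command cmd dictionary (delete_text_before_command cmd dictionary)

-- ===== LEMMAS AND PROOFS =====

-- the (run, prefix-including-the-space) pairs produced at each space of cmd, with A's reset rule
def pvPairs : List Char → List Char → List Char → List (List Char × List Char)
  | [], _, _ => []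
  | y :: ys, ts, ts2 =>
    if y = ' ' then (ts, ts2 ++ [y]) :: pvPairs ys [] (ts2 ++ [y])
    else pvPairs ys (ts ++ [y]) (ts2 ++ [y])

def pvRender (cmd : String) (p : List Char) : String :=
  PySem.Str.strip (PySem.Str.replace cmd (String.ofList p) "")

-- index of the first occurrence of w in ws, counting from i
def pvFIdx : List String → Int → String → Option Int
  | [], _, _ => none
  | x :: xs, i, w => if x = w then some i else pvFIdx xs (i + 1) w

def pvMinStep (best : Option (Int × List Char)) (q : Int × List Char) : Option (Int × List Char) :=
  match best with
  | none => some q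
  | some (b, p) => if q.1 < b then some q else some (b, p)

def pvStep (idx : PySem.Dict String Int) (best : Option (Int × List Char))
    (p : List Char × List Char) : Option (Int × List Char) :=
  match idx.get? (String.ofList p.1) with
  | none => best
  | some j => pvMinStep best (j, p.2)

-- A's selection: first dictionary word that occurs as a run; its first occurrence's prefix
def pvSelA (P : List (List Char × List Char)) : List String → Option (List Char)
  | [] => none
  | x :: rest =>
    match P.find? (fun p => x.toList == p.1) with
    | some p => some p.2
    | none => pvSelA P rest

theorem aInner_eq (cmd x : String) : ∀ (chars ts ts2 : List Char),
    aInner cmd x chars ts ts2 =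
      ((pvPairs chars ts ts2).find? (fun p => x.toList == p.1)).map (fun p => pvRender cmd p.2) := by
  intro chars
  induction chars with
  | nil => intro ts ts2; simp [aInner, pvPairs]
  | cons y ys ih =>
    intro ts ts2
    by_cases hy : y = ' '
    · by_cases hx : x.toList = ts
      · simp [aInner, pvPairs, hy, hx, pvRender]
      · simp [aInner, pvPairs, hy, hx, ih]
    · simp [aInner, pvPairs, hy, ih]

theorem aOuter_eq (cmd : String) : ∀ (dict : List String),
    aOuter cmd dict = (pvSelA (pvPairs cmd.toList [] []) dict).map (pvRender cmd) := by
  intro dict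
  induction dict with
  | nil => simp [aOuter, pvSelA]
  | cons x rest ih =>
    simp only [aOuter, pvSelA, aInner_eq]
    cases h : (pvPairs cmd.toList [] []).find? (fun p => x.toList == p.1) with
    | none => simp [ih]
    | some p => simp

theorem bIndexLoop_get (w : String) : ∀ (ws : List String) (i : Int) (d : PySem.Dict String Int),
    (bIndexLoop ws i d).get? w =
      (match d.get? w with
       | some v => some v
       | none => pvFIdx ws i w) := by
  intro ws
  induction ws with
  | nil => intro i d; cases h : d.get? w <;> simp [bIndexLoop, pvFIdx, h]
  | cons x xs ih =>
    intro i d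
    by_cases hc : d.contains x
    · rw [bIndexLoop, if_pos hc, ih]
      cases h : d.get? w with
      | some v => simp
      | none =>
        have hxw : x ≠ w := by
          intro he; subst he
          rw [PySem.Dict.get?_eq_none_iff_contains] at h
          rw [h] at hc; exact Bool.noConfusion hc
        simp [pvFIdx, hxw]
    · rw [bIndexLoop, if_neg hc, ih]
      by_cases hxw : x = w
      · subst hxw
        have h : d.get? x = none := by
          rw [PySem.Dict.get?_eq_none_iff_contains]
          exact Bool.eq_false_iff.mpr hc
        simp [PySem.Dict.get?_insert_self, h, pvFIdx]
      · have hrw := PySem.Dict.get?_insert_of_ne (d := d) (k := x) (v := i) (k' := w)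
          (fun he => hxw he.symm)
        rw [hrw]
        cases d.get? w <;> simp [pvFIdx, hxw]

theorem bLoop_eq_foldl (idx : PySem.Dict String Int) :
    ∀ (chars run pfx : List Char) (best : Option (Int × List Char)),
    bLoop idx chars run pfx best = (pvPairs chars run pfx).foldl (pvStep idx) best := by
  intro chars
  induction chars with
  | nil => intro run pfx best; simp [bLoop, pvPairs]
  | cons y ys ih =>
    intro run pfx best
    by_cases hy : y = ' '
    · simp only [bLoop, pvPairs, hy, if_pos, List.foldl_cons, ih]
      rfl
    · simp [bLoop, pvPairs, hy, ih]

theorem foldl_step_eq_filterMap (idx : PySem.Dict String Int) :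
    ∀ (P : List (List Char × List Char)) (best : Option (Int × List Char)),
    P.foldl (pvStep idx) best =
      (P.filterMap (fun p => (idx.get? (String.ofList p.1)).map (fun j => (j, p.2)))).foldl
        pvMinStep best := by
  intro P
  induction P with
  | nil => intro best; rfl
  | cons p P ih =>
    intro best
    cases h : idx.get? (String.ofList p.1) with
    | none => simp [pvStep, h, ih]
    | some j => simp [pvStep, h, ih]

theorem pvFIdx_ge : ∀ (ws : List String) (i : Int) (w : String) (j : Int),
    pvFIdx ws i w = some j → i ≤ j := by
  intro ws
  induction ws with
  | nil => intro i w j h; exact absurd h (by simp [pvFIdx])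
  | cons x xs ih =>
    intro i w j h
    rw [pvFIdx] at h
    split_ifs at h with hx
    · have := Option.some.inj h; omega
    · have := ih (i + 1) w j h; omega

theorem pvFIdx_succ (w : String) : ∀ (ws : List String) (i : Int),
    pvFIdx ws (i + 1) w = (pvFIdx ws i w).map (fun j => j + 1) := by
  intro ws
  induction ws with
  | nil => intro i; simp [pvFIdx]
  | cons x xs ih =>
    intro i
    by_cases hx : x = w
    · simp [pvFIdx, hx]
    · simp [pvFIdx, hx, ih]

theorem pvFIdx_zero_iff (x w : String) (rest : List String) :
    pvFIdx (x :: rest) 0 w = some 0 ↔ w = x := by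
  constructor
  · intro h
    rw [pvFIdx] at h
    split_ifs at h with hx
    · exact hx.symm
    · have := pvFIdx_ge rest 1 w 0 h; omega
  · intro h; simp [pvFIdx, h]

theorem minStep_stay : ∀ (L : List (Int × List Char)) (b : Int × List Char),
    (∀ q ∈ L, ¬ q.1 < b.1) → L.foldl pvMinStep (some b) = some b := by
  intro L
  induction L with
  | nil => intro b _; rfl
  | cons q L ih =>
    intro b h
    have hq : ¬ q.1 < b.1 := h q (by simp)
    have : pvMinStep (some b) q = some b := by
      simp [pvMinStep, hq]
    rw [List.foldl_cons, this]
    exact ih b (fun r hr => h r (by simp [hr]))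

theorem minStep_zero : ∀ (L : List (Int × List Char)) (acc : Option (Int × List Char))
    (z : Int × List Char),
    (∀ q ∈ L, 0 ≤ q.1) →
    (acc = none ∨ ∃ b, acc = some b ∧ 0 < b.1) →
    L.find? (fun q => q.1 == 0) = some z →
    L.foldl pvMinStep acc = some z := by
  intro L
  induction L with
  | nil => intro acc z _ _ h; simp [List.find?] at h
  | cons q L ih =>
    intro acc z hall hacc hz
    by_cases hq0 : q.1 = 0
    · have hfind : q = z := by
        have : (fun q : Int × List Char => q.1 == 0) q = true := by simp [hq0]
        rw [List.find?_cons_of_pos (p := fun q : Int × List Char => q.1 == 0) this] at hz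
        exact Option.some.inj hz
      subst hfind
      have hstep : pvMinStep acc q = some q := by
        rcases hacc with h | ⟨b, hb, hbpos⟩
        · simp [h, pvMinStep]
        · subst hb; simp [pvMinStep, hq0, hbpos]
      rw [List.foldl_cons, hstep]
      exact minStep_stay L q (fun r hr => by
        have := hall r (by simp [hr]); omega)
    · have hfind : L.find? (fun q => q.1 == 0) = some z := by
        have : ¬ ((fun q : Int × List Char => q.1 == 0) q = true) := by simp [hq0]
        rwa [List.find?_cons_of_neg (p := fun q : Int × List Char => q.1 == 0) this] at hz
      have hqpos : 0 < q.1 := by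
        have := hall q (by simp); omega
      have hacc' : pvMinStep acc q = none ∨ ∃ b, pvMinStep acc q = some b ∧ 0 < b.1 := by
        rcases hacc with h | ⟨b, hb, hbpos⟩
        · right; exact ⟨q, by simp [h, pvMinStep], hqpos⟩
        · subst hb
          right
          by_cases hlt : q.1 < b.1
          · exact ⟨q, by simp [pvMinStep, hlt], hqpos⟩
          · exact ⟨b, by simp [pvMinStep, hlt], hbpos⟩
      rw [List.foldl_cons]
      exact ih (pvMinStep acc q) z (fun r hr => hall r (by simp [hr])) hacc' hfind

theorem minStep_shift : ∀ (L : List (Int × List Char)) (acc : Option (Int × List Char)),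
    (L.map (fun q => (q.1 + 1, q.2))).foldl pvMinStep (acc.map (fun q => (q.1 + 1, q.2))) =
      (L.foldl pvMinStep acc).map (fun q => (q.1 + 1, q.2)) := by
  intro L
  induction L with
  | nil => intro acc; rfl
  | cons q L ih =>
    intro acc
    rw [List.map_cons, List.foldl_cons, List.foldl_cons]
    have hstep : pvMinStep (acc.map (fun q => (q.1 + 1, q.2))) (q.1 + 1, q.2) =
        (pvMinStep acc q).map (fun q => (q.1 + 1, q.2)) := by
      rcases acc with _ | ⟨b, p⟩
      · rfl
      · by_cases hlt : q.1 < b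
        · simp [pvMinStep, hlt]
        · simp [pvMinStep, hlt, show ¬ q.1 + 1 < b + 1 by omega]
    rw [hstep, ih]

theorem find_zero_of_find (x : String) (rest : List String) :
    ∀ (P : List (List Char × List Char)) (p : List Char × List Char),
    P.find? (fun p => x.toList == p.1) = some p →
    (P.filterMap (fun p =>
        (pvFIdx (x :: rest) 0 (String.ofList p.1)).map (fun j => (j, p.2)))).find?
      (fun q => q.1 == 0) = some (0, p.2) := by
  intro P
  induction P with
  | nil => intro p h; simp [List.find?] at h
  | cons q P ih =>
    intro p h
    by_cases hx : x.toList = q.1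
    · have hq : q = p := by
        have : (fun p : List Char × List Char => x.toList == p.1) q = true := by simp [hx]
        rw [List.find?_cons_of_pos (p := fun p : List Char × List Char => x.toList == p.1) this] at h
        exact Option.some.inj h
      subst hq
      have hof : String.ofList q.1 = x := by
        rw [← hx]; exact String.ofList_toList
      simp [hof, pvFIdx]
    · have hfind : P.find? (fun p => x.toList == p.1) = some p := by
        have : ¬ ((fun p : List Char × List Char => x.toList == p.1) q = true) := by simp [hx]
        rwa [List.find?_cons_of_neg (p := fun p : List Char × List Char => x.toList == p.1) this] at h
      have hof : String.ofList q.1 ≠ x := by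
        intro he
        apply hx
        rw [← he, String.toList_ofList]
      rw [List.filterMap_cons]
      cases hi : pvFIdx (x :: rest) 0 (String.ofList q.1) with
      | none => simpa [hi] using ih p hfind
      | some j =>
        have hj : j ≠ 0 := by
          intro he; subst he
          exact hof ((pvFIdx_zero_iff x (String.ofList q.1) rest).mp hi)
        have : ¬ ((fun q : Int × List Char => q.1 == 0) (j, q.2) = true) := by simp [hj]
        simp only [Option.map_some]
        rw [List.find?_cons_of_neg (p := fun q : Int × List Char => q.1 == 0) this]
        exact ih p hfind

theorem main_sel : ∀ (dict : List String) (P : List (List Char × List Char)),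
    ((P.filterMap (fun p =>
        (pvFIdx dict 0 (String.ofList p.1)).map (fun j => (j, p.2)))).foldl
      pvMinStep none).map (fun q => q.2) = pvSelA P dict := by
  intro dict
  induction dict with
  | nil => intro P; simp [pvFIdx, pvSelA]
  | cons x rest ih =>
    intro P
    cases hfind : P.find? (fun p => x.toList == p.1) with
    | some p =>
      have hz := find_zero_of_find x rest P p hfind
      have hnn : ∀ q ∈ P.filterMap (fun p =>
          (pvFIdx (x :: rest) 0 (String.ofList p.1)).map (fun j => (j, p.2))), 0 ≤ q.1 := by
        intro q hq
        rw [List.mem_filterMap] at hq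
        obtain ⟨r, _, hr⟩ := hq
        cases hi : pvFIdx (x :: rest) 0 (String.ofList r.1) with
        | none => rw [hi] at hr; exact absurd hr (by simp)
        | some j =>
          rw [hi] at hr
          have : q.1 = j := by
            cases hr; rfl
          rw [this]
          exact pvFIdx_ge _ 0 _ j hi
      rw [minStep_zero _ none (0, p.2) hnn (Or.inl rfl) hz]
      simp [pvSelA, hfind]
    | none =>
      have hne : ∀ p ∈ P, x.toList ≠ p.1 := by
        intro p hp he
        have := List.find?_eq_none.mp hfind p hp
        simp [he] at this
      have hcong : P.filterMap (fun p =>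
            (pvFIdx (x :: rest) 0 (String.ofList p.1)).map (fun j => (j, p.2))) =
          (P.filterMap (fun p =>
            (pvFIdx rest 0 (String.ofList p.1)).map (fun j => (j, p.2)))).map
            (fun q => (q.1 + 1, q.2)) := by
        rw [List.map_filterMap]
        apply List.filterMap_congr
        intro p hp
        have hxp : x ≠ String.ofList p.1 := by
          intro he
          exact hne p hp (by rw [he, String.toList_ofList])
        rw [pvFIdx, if_neg hxp, pvFIdx_succ, Option.map_map, Option.map_map]
        rfl
      rw [hcong]
      have := minStep_shift (P.filterMap (fun p =>
        (pvFIdx rest 0 (String.ofList p.1)).map (fun j => (j, p.2)))) none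
      simp only [Option.map_none] at this
      rw [this, Option.map_map]
      have hsel : pvSelA P (x :: rest) = pvSelA P rest := by
        simp [pvSelA, hfind]
      rw [hsel, ← ih P]
      rfl

theorem alt_eq (cmd : String) (dict : List String) :
    delete_text_before_command_alt cmd dict =
      (pvSelA (pvPairs cmd.toList [] []) dict).map (pvRender cmd) := by
  rw [delete_text_before_command_alt, bLoop_eq_foldl, foldl_step_eq_filterMap]
  have hidx : ∀ w : String, (bIndexLoop dict 0 PySem.Dict.empty).get? w = pvFIdx dict 0 w := by
    intro w
    rw [bIndexLoop_get, PySem.Dict.get?_empty]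
  have hcong : (pvPairs cmd.toList [] []).filterMap (fun p =>
        ((bIndexLoop dict 0 PySem.Dict.empty).get? (String.ofList p.1)).map (fun j => (j, p.2))) =
      (pvPairs cmd.toList [] []).filterMap (fun p =>
        (pvFIdx dict 0 (String.ofList p.1)).map (fun j => (j, p.2))) := by
    apply List.filterMap_congr
    intro p _
    rw [hidx]
  rw [hcong, ← main_sel dict]
  cases ((pvPairs cmd.toList [] []).filterMap (fun p =>
      (pvFIdx dict 0 (String.ofList p.1)).map (fun j => (j, p.2)))).foldl pvMinStep none with
  | none => simp
  | some q => simp [pvRender]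

-- ===== VERDICT (by name: the statement is the Claim_ definition above) =====
theorem delete_text_before_command_spec : Claim_equal_delete_text_before_command := by
  intro cmd dict _
  unfold Spec_delete_text_before_command delete_text_before_command
  rw [aOuter_eq, alt_eq]
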